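-- pv_equiv track=rewrite | github.com/yutanagano/tidytcells | src/tidytcells/_utils/alignment.py | _get_genes_to_alleles
-- ===== SOURCE A (Python) =====
-- def _get_genes_to_alleles(alleles):
--     genes_to_alleles = dict()
--
--     for allele in alleles:
--         gene = allele.rsplit("*")[0]
--
--         if gene not in genes_to_alleles:
--             genes_to_alleles[gene] = [allele]
--         else:
--             genes_to_alleles[gene].append(allele)
--
--     return genes_to_alleles
-- ===== SOURCE B (Python) =====
-- def _get_genes_to_alleles(alleles):
--     # Two-pass: first-appearance-ordered gene list, then one filter per gene.
--     genes = list(dict.fromkeys(a.rsplit("*")[0] for a in alleles))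
--     return {g: [a for a in alleles if a.rsplit("*")[0] == g] for g in genes}
-- ===== Notes on version B (the rewrite author's own statement) =====
-- stated objective: alternative
-- what changed: Replaces the single dict-building loop with a two-pass decomposition: an ordered dedup of gene keys (dict.fromkeys) followed by one filter comprehension per gene.
import Mathlib
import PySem

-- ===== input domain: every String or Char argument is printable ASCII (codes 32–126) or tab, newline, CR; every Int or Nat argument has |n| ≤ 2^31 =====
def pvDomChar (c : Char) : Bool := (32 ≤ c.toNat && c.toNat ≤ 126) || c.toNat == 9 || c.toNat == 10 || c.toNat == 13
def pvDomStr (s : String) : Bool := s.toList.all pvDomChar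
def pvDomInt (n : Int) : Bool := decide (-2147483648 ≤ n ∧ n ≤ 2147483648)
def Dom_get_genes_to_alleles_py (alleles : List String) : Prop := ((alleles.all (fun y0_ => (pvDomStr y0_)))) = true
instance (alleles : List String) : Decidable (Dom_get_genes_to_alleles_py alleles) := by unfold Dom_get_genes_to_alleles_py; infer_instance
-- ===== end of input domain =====

-- B groups alleles by gene with a two-pass decomposition (ordered dedup of keys, then one filter per gene)
-- instead of A's single dict-building loop; objective: alternative (not faster).

-- ===== PORT A =====
-- allele.rsplit("*")[0]: rsplit with no maxsplit yields the same pieces as split, and the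
-- result of split is always nonempty, so the [0] indexing never raises (headD "" is exact here).
def geneOf (a : String) : String := ((PySem.Str.split? a "*").getD []).headD ""

def get_genes_to_alleles_py (alleles : List String) : List (String × List String) :=
  (alleles.foldl
    (fun d allele =>
      let gene := geneOf allele
      if ¬ d.contains gene then d.insert gene [allele]
      else d.modify gene [] (fun l => l ++ [allele]))
    PySem.Dict.empty).items

-- ===== PORT B =====
def get_genes_to_alleles_py_alt (alleles : List String) : List (String × List String) :=
  (PySem.List.dedup (alleles.map geneOf)).map
    (fun g => (g, alleles.filter (fun a => geneOf a == g)))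

-- ===== PRECONDITION & SPEC =====
def Spec_get_genes_to_alleles_py (alleles : List String) (out : List (String × List String)) : Prop := out = get_genes_to_alleles_py_alt alleles
instance (alleles : List String) (out : List (String × List String)) : Decidable (Spec_get_genes_to_alleles_py alleles out) := by unfold Spec_get_genes_to_alleles_py; infer_instance

-- ===== CLAIM (what is proved, stated in full; the proofs are below) =====
def Claim_equal_get_genes_to_alleles_py : Prop := ∀ (alleles : List String), Dom_get_genes_to_alleles_py alleles → Spec_get_genes_to_alleles_py alleles (get_genes_to_alleles_py alleles)

-- ===== LEMMAS AND PROOFS =====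

-- A's explicit insert/append branch is exactly Dict.modify with default [].
theorem step_eq_modify (d : PySem.Dict String (List String)) (a : String) :
    (let gene := geneOf a
     if ¬ d.contains gene then d.insert gene [a]
     else d.modify gene [] (fun l => l ++ [a]))
    = d.modify (geneOf a) [] (fun l => l ++ [a]) := by
  by_cases h : d.contains (geneOf a)
  · simp [h]
  · have h' : d.contains (geneOf a) = false := by simpa using h
    simp [h', PySem.Dict.modify, PySem.Dict.getD_of_not_contains d [] h']

theorem foldl_modify_eq (alleles : List String) :
    alleles.foldl (fun d a => d.modify (geneOf a) [] (fun l => l ++ [a])) PySem.Dict.empty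
    = (alleles.map (fun a => (geneOf a, a))).foldl
        (fun d p => d.modify p.1 [] (fun l => l ++ [p.2])) PySem.Dict.empty := by
  rw [List.foldl_map]

theorem main_eq (alleles : List String) :
    get_genes_to_alleles_py alleles = get_genes_to_alleles_py_alt alleles := by
  unfold get_genes_to_alleles_py get_genes_to_alleles_py_alt
  have hstep : (fun (d : PySem.Dict String (List String)) (allele : String) =>
      let gene := geneOf allele
      if ¬ d.contains gene then d.insert gene [allele]
      else d.modify gene [] (fun l => l ++ [allele]))
      = fun d a => d.modify (geneOf a) [] (fun l => l ++ [a]) := by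
    funext d a; exact step_eq_modify d a
  rw [hstep]
  have hnd : (alleles.foldl (fun d a => d.modify (geneOf a) [] (fun l => l ++ [a]))
      PySem.Dict.empty).keys.Nodup :=
    PySem.Dict.nodup_keys_foldl_modify_key alleles geneOf []
      (fun _ a l => l ++ [a]) PySem.Dict.empty (by simp)
  rw [PySem.Dict.items_eq_map_keys _ hnd []]
  have hkeys : (alleles.foldl (fun d a => d.modify (geneOf a) [] (fun l => l ++ [a]))
      PySem.Dict.empty).keys = PySem.List.dedup (alleles.map geneOf) := by
    rw [PySem.Dict.keys_foldl_modify_key alleles geneOf [] (fun _ a l => l ++ [a])]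
    rw [PySem.List.dedup_eq_ofList, PySem.Dict.keys_empty, PySem.Set.update_nil_left]
  rw [hkeys]
  apply List.map_congr_left
  intro g _
  congr 1
  rw [foldl_modify_eq, PySem.Dict.getD_foldl_modify_append]
  simp [List.filter_map, Function.comp_def]

-- ===== VERDICT (by name: the statement is the Claim_ definition above) =====
theorem get_genes_to_alleles_py_spec : Claim_equal_get_genes_to_alleles_py := by
  intro alleles _
  unfold Spec_get_genes_to_alleles_py
  exact main_eq alleles
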